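-- pv_equiv track=rewrite | github.com/adamsoro0321/anarisk_backend | src/layout/header.py | get_clean_page_name
-- ===== SOURCE A (Python) =====
-- def get_clean_page_name(page_name):
--     """Nettoie et formate le nom de la page pour l'affichage"""
--     # Supprime les underscores et tire-bas, capitalise
--     clean_name = page_name.replace("_", " ").replace("-", " ")
--
--     # Capitalise chaque mot
--     clean_name = " ".join(word.capitalize() for word in clean_name.split())
--
--     # Remplacements spécifiques pour le français
--     replacements = {
--         "Home": "Accueil",
--         "Index": "Accueil",
--         "Dashboard": "Tableau de Bord",
--         "Taxpayer": "Contribuable",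
--         "Indicator": "Indicateur",
--         "Report": "Rapport",
--         "Setting": "Paramètres",
--         "Config": "Configuration",
--         "Data": "Données",
--     }
--
--     for en, fr in replacements.items():
--         clean_name = clean_name.replace(en, fr)
--
--     return clean_name
-- ===== SOURCE B (Python) =====
-- import re
--
-- _REPLACEMENTS = {
--     "Home": "Accueil",
--     "Index": "Accueil",
--     "Dashboard": "Tableau de Bord",
--     "Taxpayer": "Contribuable",
--     "Indicator": "Indicateur",
--     "Report": "Rapport",
--     "Setting": "Param\u00e8tres",
--     "Config": "Configuration",
--     "Data": "Donn\u00e9es",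
-- }
--
-- _TRANS = str.maketrans("_-", "  ")
--
-- _PATTERN = re.compile("|".join(map(re.escape, _REPLACEMENTS)))
--
--
-- def get_clean_page_name(page_name):
--     """Nettoie et formate le nom de la page pour l'affichage"""
--     # One char-map pass instead of two replace passes, then capitalize each word
--     clean_name = " ".join(
--         word.capitalize() for word in page_name.translate(_TRANS).split()
--     )
--     # One scan with an alternation pattern instead of nine sequential replaces
--     return _PATTERN.sub(lambda m: _REPLACEMENTS[m.group(0)], clean_name)
-- ===== Notes on version B (the rewrite author's own statement) =====
-- stated objective: idiomatic
-- what changed: The two chained str.replace calls become one str.translate char-map pass, and the nine sequential whole-string replace passes become a single left-to-right re.sub scan over a precompiled alternation pattern with a dict lookup per match.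
import Mathlib
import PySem

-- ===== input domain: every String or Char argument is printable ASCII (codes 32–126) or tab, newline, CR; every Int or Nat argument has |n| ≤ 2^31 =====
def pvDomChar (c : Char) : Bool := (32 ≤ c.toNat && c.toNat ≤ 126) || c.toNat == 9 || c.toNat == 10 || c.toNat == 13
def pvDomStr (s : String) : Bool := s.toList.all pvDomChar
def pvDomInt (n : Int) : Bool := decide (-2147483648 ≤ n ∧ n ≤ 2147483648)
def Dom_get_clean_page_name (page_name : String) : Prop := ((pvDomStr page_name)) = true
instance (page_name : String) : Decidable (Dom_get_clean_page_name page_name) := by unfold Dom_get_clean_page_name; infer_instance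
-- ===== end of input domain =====

-- B replaces the two chained str.replace passes by one character-map pass and the nine
-- sequential str.replace passes by a single left-to-right scan over the alternation of the
-- nine keys (re.sub with a dict lookup per match); same return value, no speed claim.

-- ===== PORT A =====
-- word.capitalize(): first char to upper, rest lowered — exact on the ASCII domain,
-- where Python's titlecase/lower of the first char coincide with upperChar/lower.
def pvCapitalize (w : List Char) : List Char :=
  match w with
  | [] => []
  | c :: t => PySem.Chars.upperChar c :: PySem.Chars.lower t

def pvReplacements : PySem.Dict String String := PySem.Dict.mk
  [("Home", "Accueil"), ("Index", "Accueil"), ("Dashboard", "Tableau de Bord"),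
   ("Taxpayer", "Contribuable"), ("Indicator", "Indicateur"), ("Report", "Rapport"),
   ("Setting", "Paramètres"), ("Config", "Configuration"), ("Data", "Données")]

def get_clean_page_name (page_name : String) : String :=
  let clean_name := PySem.Str.replace (PySem.Str.replace page_name "_" " ") "-" " "
  let clean_name := PySem.Str.join " "
    ((PySem.Str.split₀ clean_name).map (fun word => String.ofList (pvCapitalize word.toList)))
  pvReplacements.items.foldl (fun cn p => PySem.Str.replace cn p.1 p.2) clean_name

-- ===== PORT B =====
-- str.maketrans("_-", "  ") / translate: a single per-character map
def pvTranslate (c : Char) : Char := if c = '_' ∨ c = '-' then ' ' else c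

-- the compiled alternation pattern: the dict keys (no regex metacharacters) with their values
def pvPattern : List (List Char × List Char) :=
  [("Home".toList, "Accueil".toList), ("Index".toList, "Accueil".toList),
   ("Dashboard".toList, "Tableau de Bord".toList), ("Taxpayer".toList, "Contribuable".toList),
   ("Indicator".toList, "Indicateur".toList), ("Report".toList, "Rapport".toList),
   ("Setting".toList, "Paramètres".toList), ("Config".toList, "Configuration".toList),
   ("Data".toList, "Données".toList)]

-- hand port of _PATTERN.sub(lambda m: _REPLACEMENTS[m.group(0)]): exact for a literal
-- alternation — re scans left to right, at each position tries the alternatives in pattern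
-- order, on a match emits the replacement and resumes after the matched text
def pvSub : List Char → List Char
  | [] => []
  | c :: t =>
    match pvPattern.find? (fun kv => kv.1.isPrefixOf (c :: t)) with
    | some kv => kv.2 ++ pvSub (t.drop (kv.1.length - 1))
    | none => c :: pvSub t
termination_by cs => cs.length
decreasing_by
  · simp only [List.length_drop, List.length_cons]; omega
  · simp only [List.length_cons]; omega

def get_clean_page_name_alt (page_name : String) : String :=
  let clean_name := PySem.Str.join " "
    ((PySem.Str.split₀ (String.ofList (page_name.toList.map pvTranslate))).map
      (fun word => String.ofList (pvCapitalize word.toList)))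
  String.ofList (pvSub clean_name.toList)

-- ===== PRECONDITION & SPEC =====
def Spec_get_clean_page_name (page_name : String) (out : String) : Prop := out = get_clean_page_name_alt page_name
instance (page_name : String) (out : String) : Decidable (Spec_get_clean_page_name page_name out) := by unfold Spec_get_clean_page_name; infer_instance

-- ===== CLAIM (what is proved, stated in full; the proofs are below) =====
def Claim_equal_get_clean_page_name : Prop := ∀ (page_name : String), Dom_get_clean_page_name page_name → Spec_get_clean_page_name page_name (get_clean_page_name page_name)

-- ===== LEMMAS AND PROOFS =====

-- clean recursive form of Python str.replace for a nonempty pattern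
def repl1 (k v : List Char) : List Char → List Char
  | [] => []
  | c :: t =>
    if k.isPrefixOf (c :: t) then v ++ repl1 k v (t.drop (k.length - 1))
    else c :: repl1 k v t
termination_by cs => cs.length
decreasing_by
  · simp only [List.length_drop, List.length_cons]; omega
  · simp only [List.length_cons]; omega

theorem go_spec (k v : List Char) (hk : k ≠ []) :
    ∀ fuel (l acc : List Char), l.length ≤ fuel →
      PySem.Chars.replace.go k v fuel l acc = acc.reverse ++ repl1 k v l := by
  intro fuel
  induction fuel with
  | zero =>
    intro l acc hl
    have : l = [] := by cases l <;> simp_all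
    subst this
    simp [PySem.Chars.replace.go, repl1]
  | succ n ih =>
    intro l acc hl
    cases l with
    | nil => simp [PySem.Chars.replace.go, repl1]
    | cons c t =>
      rw [PySem.Chars.replace.go]
      by_cases hp : k.isPrefixOf (c :: t)
      · simp only [hp, if_true]
        have hdrop : (c :: t).drop k.length = t.drop (k.length - 1) := by
          cases hK : k with
          | nil => simp_all
          | cons a kt => simp [hK]
        have hle : (t.drop (k.length - 1)).length ≤ n := by
          have h1 : (t.drop (k.length - 1)).length ≤ t.length := by
            simp only [List.length_drop]; omega
          simp only [List.length_cons] at hl; omega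
        rw [hdrop, ih _ _ hle, repl1]
        simp [hp]
      · rw [if_neg hp, ih _ _ (by simp only [List.length_cons] at hl; omega), repl1]
        simp [hp]

theorem replace_eq_repl1 (k v s : List Char) (hk : k ≠ []) :
    PySem.Chars.replace s k v = repl1 k v s := by
  rw [PySem.Chars.replace]
  simp only [List.isEmpty_iff, hk, if_false]
  rw [go_spec k v hk s.length s [] le_rfl]
  simp

theorem repl1_nil (k v : List Char) : repl1 k v [] = [] := by rw [repl1]

theorem repl1_cons (k v : List Char) (c : Char) (t : List Char) :
    repl1 k v (c :: t)
      = if k.isPrefixOf (c :: t) then v ++ repl1 k v (t.drop (k.length - 1))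
        else c :: repl1 k v t := by
  rw [repl1]

theorem repl1_headmatch (k v : List Char) (hk : k ≠ []) (x : List Char) :
    repl1 k v (k ++ x) = v ++ repl1 k v x := by
  cases hK : k with
  | nil => simp_all
  | cons a kt =>
    rw [List.cons_append, repl1]
    have hp : (a :: kt).isPrefixOf (a :: (kt ++ x)) = true := by
      rw [List.isPrefixOf_iff_prefix]
      exact ⟨x, by simp⟩
    rw [if_pos hp]
    simp [List.drop_left']

-- pattern matches nowhere in a region whose chars differ from the pattern's first char
theorem repl1_region (k v : List Char) (hk : k ≠ []) (pre x : List Char)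
    (h : ∀ c ∈ pre, k.head? ≠ some c) :
    repl1 k v (pre ++ x) = pre ++ repl1 k v x := by
  induction pre with
  | nil => simp
  | cons c pre' ih =>
    have hneg : ¬ k.isPrefixOf (c :: (pre' ++ x)) = true := by
      intro hp
      rw [List.isPrefixOf_iff_prefix] at hp
      cases hK : k with
      | nil => exact hk hK
      | cons a kt =>
        rw [hK] at hp
        obtain ⟨t, ht⟩ := hp
        have : a = c := by
          have := congrArg (fun l => l.head?) ht
          simpa using this
        exact h c (by simp) (by simp [hK, this])
    rw [List.cons_append, repl1, if_neg hneg, ih (fun c hc => h c (by simp [hc]))]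
    simp

-- mismatch strictly inside pre at every offset: no occurrence can start inside pre
def noStart (k pre : List Char) : Bool :=
  (List.range pre.length).all
    (fun p => (List.range (min k.length (pre.length - p))).any (fun m => k[m]? != pre[p + m]?))

theorem noStart_spec {k pre : List Char} (h : noStart k pre = true) :
    ∀ p < pre.length, ∃ m < min k.length (pre.length - p), k[m]? ≠ pre[p + m]? := by
  intro p hp
  rw [noStart, List.all_eq_true] at h
  have := h p (List.mem_range.mpr hp)
  rw [List.any_eq_true] at this
  obtain ⟨m, hm, hne⟩ := this
  exact ⟨m, List.mem_range.mp hm, by simpa using hne⟩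

theorem repl1_append_of_noStart (k v : List Char) (hk : k ≠ []) (pre x : List Char)
    (h : ∀ p < pre.length, ∃ m < min k.length (pre.length - p), k[m]? ≠ pre[p + m]?) :
    repl1 k v (pre ++ x) = pre ++ repl1 k v x := by
  induction pre with
  | nil => simp
  | cons d pre' ih =>
    have hneg : ¬ k.isPrefixOf (d :: (pre' ++ x)) = true := by
      intro hp
      rw [List.isPrefixOf_iff_prefix] at hp
      obtain ⟨m, hm, hne⟩ := h 0 (by simp)
      apply hne
      obtain ⟨t, ht⟩ := hp
      have h1 : ((d :: pre') ++ x)[m]? = k[m]? := by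
        rw [List.cons_append, ← ht, List.getElem?_append_left (by omega)]
      have h2 : ((d :: pre') ++ x)[m]? = (d :: pre')[m]? := by
        rw [List.getElem?_append_left (by simp at hm ⊢; omega)]
      simp only [Nat.zero_add]
      rw [← h1, h2]
    have hsh : ∀ p < pre'.length, ∃ m < min k.length (pre'.length - p), k[m]? ≠ pre'[p + m]? := by
      intro p hp
      obtain ⟨m, hm, hne⟩ := h (p + 1) (by simp; omega)
      refine ⟨m, by simp at hm ⊢; omega, ?_⟩
      have harith : p + 1 + m = (p + m) + 1 := by omega
      rw [harith, List.getElem?_cons_succ] at hne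
      exact hne
    rw [List.cons_append, repl1, if_neg hneg, ih hsh]
    simp

-- a space-free pattern distributes over a space
theorem repl1_space (k v : List Char) (hk : k ≠ []) (hs : ' ' ∉ k) :
    ∀ u w : List Char, repl1 k v (u ++ ' ' :: w) = repl1 k v u ++ ' ' :: repl1 k v w := by
  suffices H : ∀ n (u w : List Char), u.length ≤ n →
      repl1 k v (u ++ ' ' :: w) = repl1 k v u ++ ' ' :: repl1 k v w by
    intro u w; exact H u.length u w le_rfl
  intro n
  induction n with
  | zero =>
    intro u w hu
    have : u = [] := by cases u <;> simp_all
    subst this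
    have hneg : ¬ k.isPrefixOf (' ' :: w) = true := by
      intro hp
      rw [List.isPrefixOf_iff_prefix] at hp
      cases hK : k with
      | nil => exact hk hK
      | cons a kt =>
        rw [hK] at hp
        obtain ⟨t, ht⟩ := hp
        have : a = ' ' := by
          have := congrArg (fun l => l.head?) ht
          simpa using this
        exact hs (by simp [hK, this])
    rw [List.nil_append, repl1_cons, if_neg hneg, repl1_nil, List.nil_append]
  | succ n IH =>
    intro u w hu
    cases u with
    | nil => exact IH [] w (by simp)
    | cons c u' =>
      by_cases hp : k.isPrefixOf (c :: (u' ++ ' ' :: w)) = true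
      · have hp' : k <+: (c :: u') ++ ' ' :: w := by
          rw [List.isPrefixOf_iff_prefix] at hp
          simpa using hp
        have hlen : k.length ≤ (c :: u').length := by
          by_contra hgt
          push_neg at hgt
          obtain ⟨t, ht⟩ := hp'
          have h1 : ((c :: u') ++ ' ' :: w)[(c :: u').length]? = some ' ' := by
            rw [List.getElem?_append_right (le_refl _)]
            simp
          apply hs
          have h2 : ((c :: u') ++ ' ' :: w)[(c :: u').length]? = k[(c :: u').length]? := by
            rw [← ht, List.getElem?_append_left hgt]
          rw [h2] at h1
          exact List.mem_of_getElem? h1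
        have hpu : k <+: (c :: u') := by
          obtain ⟨t, ht⟩ := hp'
          have : k = ((c :: u') ++ ' ' :: w).take k.length := by
            rw [← ht]; simp
          rw [List.take_append_of_le_length hlen] at this
          exact this ▸ List.take_prefix _ _
        obtain ⟨u₂, hu₂⟩ := hpu
        have hlt : u₂.length < (c :: u').length := by
          have := congrArg List.length hu₂
          cases hK : k with
          | nil => exact absurd hK hk
          | cons a kt => rw [hK] at this; simp at this ⊢; omega
        have hu₂n : u₂.length ≤ n := by
          simp only [List.length_cons] at hu hlt; omega
        rw [← hu₂, List.append_assoc, repl1_headmatch k v hk, repl1_headmatch k v hk,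
          IH u₂ w hu₂n, List.append_assoc]
      · have hp₂ : ¬ k.isPrefixOf (c :: u') = true := by
          intro hpu
          apply hp
          rw [List.isPrefixOf_iff_prefix] at hpu ⊢
          have := hpu.trans (l₃ := (c :: u') ++ ' ' :: w) ⟨' ' :: w, rfl⟩
          simpa using this
        rw [List.cons_append, repl1_cons, if_neg hp,
          IH u' w (by simp only [List.length_cons] at hu; omega), repl1_cons, if_neg hp₂,
          List.cons_append]

-- single-char replace is a map
theorem repl1_single (a b : Char) (s : List Char) :
    repl1 [a] [b] s = s.map (fun c => if c = a then b else c) := by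
  induction s with
  | nil => rw [repl1]; rfl
  | cons c t ih =>
    rw [repl1]
    by_cases hc : c = a
    · subst hc
      rw [if_pos (by rw [List.isPrefixOf_iff_prefix]; exact ⟨t, rfl⟩)]
      simp [ih]
    · rw [if_neg, List.map_cons, if_neg hc, ih]
      intro hp
      rw [List.isPrefixOf_iff_prefix] at hp
      obtain ⟨t', ht⟩ := hp
      have : a = c := by
        have := congrArg (fun l => l.head?) ht
        simpa using this
      exact hc this.symm

-- " ".join as plain recursion
def sjoin : List (List Char) → List Char
  | [] => []
  | [w] => w
  | w :: ws => w ++ ' ' :: sjoin ws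

theorem sjoin_cons₂ (w x : List Char) (t : List (List Char)) :
    sjoin (w :: x :: t) = w ++ ' ' :: sjoin (x :: t) := rfl

theorem join_eq_sjoin (ws : List (List Char)) : PySem.Chars.join [' '] ws = sjoin ws := by
  induction ws with
  | nil => rfl
  | cons w ws ih =>
    cases ws with
    | nil => simp [PySem.Chars.join, List.intercalate, sjoin]
    | cons x t =>
      rw [sjoin_cons₂, ← ih]
      simp [PySem.Chars.join, List.intercalate, List.intersperse]

theorem repl1_sjoin (k v : List Char) (hk : k ≠ []) (hs : ' ' ∉ k) (ws : List (List Char)) :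
    repl1 k v (sjoin ws) = sjoin (ws.map (repl1 k v)) := by
  induction ws with
  | nil => simp [sjoin, repl1_nil]
  | cons w ws ih =>
    cases ws with
    | nil => simp [sjoin]
    | cons x t =>
      rw [sjoin_cons₂, repl1_space k v hk hs, ih]
      simp [sjoin_cons₂]

-- a word's value under the whole pipeline: first matching key replaces the word's head
def wSpec (kvs : List (List Char × List Char)) (w : List Char) : List Char :=
  match kvs.find? (fun kv => kv.1.isPrefixOf w) with
  | some kv => kv.2 ++ w.drop kv.1.length
  | none => w

-- key-table hypotheses
def goodKV (kvs : List (List Char × List Char)) : Prop :=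
  (∀ kv ∈ kvs, kv.1 ≠ [] ∧ ' ' ∉ kv.1 ∧ PySem.Chars.isupper (kv.1.headI) = true) ∧
  List.Pairwise (fun a b => noStart b.1 a.2 = true) kvs

-- a capitalized word: nonempty, space-free, no uppercase past the first char
def goodWord (w : List Char) : Prop :=
  w ≠ [] ∧ (∀ c ∈ w, c ≠ ' ') ∧ ∀ c ∈ w.tail, PySem.Chars.isupper c = false

theorem foldl_fixed {α β : Type} (step : α → β → α) (l : List β) (s : α)
    (h : ∀ b ∈ l, step s b = s) : l.foldl step s = s := by
  induction l with
  | nil => rfl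
  | cons b t ih =>
    rw [List.foldl_cons, h b (by simp)]
    exact ih (fun b hb => h b (by simp [hb]))


theorem isupper_lowerChar (c : Char) : PySem.Chars.isupper (PySem.Chars.lowerChar c) = false := by
  unfold PySem.Chars.lowerChar
  by_cases h : PySem.Chars.isupper c = true
  · rw [if_pos h]
    unfold PySem.Chars.isupper at h
    simp only [Bool.and_eq_true, decide_eq_true_eq] at h
    obtain ⟨h1, h2⟩ := h
    have hc1 : 65 ≤ c.toNat := h1
    have hc2 : c.toNat ≤ 90 := h2
    have hv : (Char.ofNat (c.toNat + 32)).toNat = c.toNat + 32 := by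
      rw [Char.toNat_ofNat, if_pos (Or.inl (by omega))]
    have hle : ¬ (Char.ofNat (c.toNat + 32) ≤ 'Z') := by
      intro hle
      have : (Char.ofNat (c.toNat + 32)).toNat ≤ 90 := hle
      omega
    unfold PySem.Chars.isupper
    simp [hle]
  · rw [if_neg h]
    simpa using h

theorem lowerChar_ne_space {c : Char} (hc : c ≠ ' ') : PySem.Chars.lowerChar c ≠ ' ' := by
  unfold PySem.Chars.lowerChar
  by_cases h : PySem.Chars.isupper c = true
  · rw [if_pos h]
    unfold PySem.Chars.isupper at h
    simp only [Bool.and_eq_true, decide_eq_true_eq] at h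
    obtain ⟨h1, h2⟩ := h
    have hc1 : 65 ≤ c.toNat := h1
    have hc2 : c.toNat ≤ 90 := h2
    intro heq
    have := congrArg Char.toNat heq
    rw [Char.toNat_ofNat, if_pos (Or.inl (by omega))] at this
    have hsp : (' ' : Char).toNat = 32 := rfl
    omega
  · rw [if_neg h]
    exact hc

theorem upperChar_ne_space {c : Char} (hc : c ≠ ' ') : PySem.Chars.upperChar c ≠ ' ' := by
  unfold PySem.Chars.upperChar
  by_cases h : PySem.Chars.islower c = true
  · rw [if_pos h]
    unfold PySem.Chars.islower at h
    simp only [Bool.and_eq_true, decide_eq_true_eq] at h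
    obtain ⟨h1, h2⟩ := h
    have hc1 : 97 ≤ c.toNat := h1
    have hc2 : c.toNat ≤ 122 := h2
    intro heq
    have := congrArg Char.toNat heq
    rw [Char.toNat_ofNat, if_pos (Or.inl (by omega))] at this
    have hsp : (' ' : Char).toNat = 32 := rfl
    omega
  · rw [if_neg h]
    exact hc

-- the words of str.split() are nonempty and whitespace-free
theorem split₀_go_good :
    ∀ (s cur : List Char) (acc : List (List Char)),
      (∀ w ∈ acc, w ≠ [] ∧ ∀ c ∈ w, PySem.Chars.isspace c = false) →
      (∀ c ∈ cur, PySem.Chars.isspace c = false) →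
      ∀ w ∈ PySem.Chars.split₀.go s cur acc, w ≠ [] ∧ ∀ c ∈ w, PySem.Chars.isspace c = false := by
  intro s
  induction s with
  | nil =>
    intro cur acc hacc hcur w hw
    rw [PySem.Chars.split₀.go] at hw
    by_cases hc : cur.isEmpty = true
    · rw [if_pos hc] at hw
      simp only [List.mem_reverse] at hw
      exact hacc w hw
    · rw [if_neg hc] at hw
      simp only [List.mem_reverse, List.mem_cons] at hw
      rcases hw with h | h
      · subst h
        refine ⟨by simpa using hc, fun c hcw => hcur c (by simpa using hcw)⟩
      · exact hacc w h
  | cons c rest ih =>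
    intro cur acc hacc hcur w hw
    rw [PySem.Chars.split₀.go] at hw
    by_cases hs : PySem.Chars.isspace c = true
    · rw [if_pos hs] at hw
      by_cases hc : cur.isEmpty = true
      · rw [if_pos hc] at hw
        exact ih [] acc hacc (by simp) w hw
      · rw [if_neg hc] at hw
        refine ih [] (cur.reverse :: acc) ?_ (by simp) w hw
        intro u hu
        rcases List.mem_cons.mp hu with h | h
        · subst h
          refine ⟨by simpa using hc, fun x hx => hcur x (by simpa using hx)⟩
        · exact hacc u h
    · rw [if_neg hs] at hw
      refine ih (c :: cur) acc hacc ?_ w hw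
      intro x hx
      rcases List.mem_cons.mp hx with h | h
      · subst h; simpa using hs
      · exact hcur x h

theorem split₀_good (s : List Char) :
    ∀ w ∈ PySem.Chars.split₀ s, w ≠ [] ∧ ∀ c ∈ w, PySem.Chars.isspace c = false := by
  intro w hw
  exact split₀_go_good s [] [] (by simp) (by simp) w (by rw [PySem.Chars.split₀] at hw; exact hw)

theorem find?_congr' {α : Type} (p q : α → Bool) (l : List α) (h : ∀ x ∈ l, p x = q x) :
    l.find? p = l.find? q := by
  induction l with
  | nil => rfl
  | cons a t ih =>
    simp only [List.find?]
    rw [h a (by simp)]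
    split <;> simp_all

-- a space-free pattern matches at a word's start iff it matches within the word
theorem prefix_space_ext (k w J : List Char) (hs : ' ' ∉ k) :
    k.isPrefixOf (w ++ ' ' :: J) = k.isPrefixOf w := by
  by_cases hp : k.isPrefixOf w = true
  · rw [hp, List.isPrefixOf_iff_prefix]
    exact (List.isPrefixOf_iff_prefix.mp hp).trans ⟨' ' :: J, rfl⟩
  · rw [Bool.eq_false_iff.mpr hp, Bool.eq_false_iff]
    intro hq
    apply hp
    rw [List.isPrefixOf_iff_prefix] at hq ⊢
    have hlen : k.length ≤ w.length := by
      by_contra hgt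
      push_neg at hgt
      obtain ⟨t, ht⟩ := hq
      have h1 : (w ++ ' ' :: J)[w.length]? = some ' ' := by
        rw [List.getElem?_append_right (le_refl _)]
        simp
      apply hs
      have h2 : (w ++ ' ' :: J)[w.length]? = k[w.length]? := by
        rw [← ht, List.getElem?_append_left hgt]
      rw [h2] at h1
      exact List.mem_of_getElem? h1
    obtain ⟨t, ht⟩ := hq
    have : k = (w ++ ' ' :: J).take k.length := by rw [← ht]; simp
    rw [List.take_append_of_le_length hlen] at this
    exact this ▸ List.take_prefix _ _

-- A's sequential replaces on one word equal wSpec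
theorem headI_ne {k : List Char} {c : Char} (hk : k ≠ [])
    (hup : PySem.Chars.isupper k.headI = true) (hc : PySem.Chars.isupper c = false) :
    k.head? ≠ some c := by
  cases k with
  | nil => exact absurd rfl hk
  | cons a kt =>
    simp only [List.headI] at hup
    simp only [List.head?_cons]
    intro h
    have h' : a = c := by injection h
    rw [h'] at hup
    rw [hup] at hc
    simp at hc

theorem not_prefix_of_headI {k : List Char} {c : Char} {t : List Char} (hk : k ≠ [])
    (hup : PySem.Chars.isupper k.headI = true) (hc : PySem.Chars.isupper c = false) :
    k.isPrefixOf (c :: t) = false := by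
  cases k with
  | nil => exact absurd rfl hk
  | cons a kt =>
    simp only [List.headI] at hup
    simp only [List.isPrefixOf, Bool.and_eq_false_iff]
    left
    simp only [beq_eq_false_iff_ne, ne_eq]
    intro h
    rw [h] at hup
    rw [hup] at hc
    simp at hc

theorem foldl_word (kvs : List (List Char × List Char)) (hkv : goodKV kvs)
    (w : List Char) (hw : goodWord w) :
    kvs.foldl (fun s kv => repl1 kv.1 kv.2 s) w = wSpec kvs w := by
  obtain ⟨hw1, hw2, hw3⟩ := hw
  obtain ⟨c, m, rfl⟩ : ∃ c m, w = c :: m := by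
    cases w with
    | nil => exact absurd rfl hw1
    | cons c m => exact ⟨c, m, rfl⟩
  simp only [List.tail_cons] at hw3
  revert hkv
  induction kvs with
  | nil => intro _; simp [wSpec]
  | cons kv rest ih =>
    intro hkv
    obtain ⟨hk1, hk2, hk3⟩ := hkv.1 kv (by simp)
    have hrest : goodKV rest :=
      ⟨fun p hp => hkv.1 p (by simp [hp]), (List.pairwise_cons.mp hkv.2).2⟩
    by_cases hp : kv.1.isPrefixOf (c :: m) = true
    · obtain ⟨tail, htail⟩ := List.isPrefixOf_iff_prefix.mp hp
      have htail_drop : tail = (c :: m).drop kv.1.length := by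
        rw [← htail, List.drop_left]
      have htail_m : ∀ x ∈ tail, PySem.Chars.isupper x = false := by
        intro x hx
        apply hw3
        have : tail <:+ c :: m := ⟨kv.1, htail⟩
        have hxm : x ∈ c :: m := this.subset hx
        rcases List.mem_cons.mp hxm with h | h
        · -- x = c: then c ∈ tail; tail is a suffix of m unless kv.1 = [], impossible
          subst h
          cases hK : kv.1 with
          | nil => exact absurd hK hk1
          | cons a kt =>
            rw [hK, List.cons_append] at htail
            have : tail <:+ m := ⟨kt, by injection htail⟩
            exact this.subset hx
        · exact h
      have hstep : repl1 kv.1 kv.2 (c :: m) = kv.2 ++ tail := by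
        rw [← htail, repl1_headmatch kv.1 kv.2 hk1]
        have := repl1_region kv.1 kv.2 hk1 tail []
          (fun x hx => headI_ne hk1 hk3 (htail_m x hx))
        rw [List.append_nil] at this
        rw [this, repl1_nil, List.append_nil]
      have hfix : rest.foldl (fun s kv => repl1 kv.1 kv.2 s) (kv.2 ++ tail) = kv.2 ++ tail := by
        apply foldl_fixed
        intro b hb
        obtain ⟨hb1, hb2, hb3⟩ := hrest.1 b hb
        have hns := (List.pairwise_cons.mp hkv.2).1 b hb
        rw [repl1_append_of_noStart b.1 b.2 hb1 kv.2 tail (noStart_spec hns)]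
        have := repl1_region b.1 b.2 hb1 tail []
          (fun x hx => headI_ne hb1 hb3 (htail_m x hx))
        rw [List.append_nil] at this
        rw [this, repl1_nil, List.append_nil]
      have hfind : List.find? (fun kv => kv.1.isPrefixOf (c :: m)) (kv :: rest) = some kv := by
        simp [List.find?_cons, hp]
      rw [List.foldl_cons, hstep, hfix, wSpec, hfind, htail_drop]
    · have hstep : repl1 kv.1 kv.2 (c :: m) = c :: m := by
        rw [repl1_cons, if_neg hp]
        have := repl1_region kv.1 kv.2 hk1 m []
          (fun x hx => headI_ne hk1 hk3 (hw3 x hx))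
        rw [List.append_nil] at this
        rw [this, repl1_nil, List.append_nil]
      have hfind : List.find? (fun kv => kv.1.isPrefixOf (c :: m)) (kv :: rest)
          = List.find? (fun kv => kv.1.isPrefixOf (c :: m)) rest := by
        simp [List.find?_cons, hp]
      rw [List.foldl_cons, hstep, ih hrest]
      unfold wSpec
      rw [hfind]

-- A's sequential replaces distribute over the joined words
theorem foldl_sjoin (kvs : List (List Char × List Char))
    (h : ∀ kv ∈ kvs, kv.1 ≠ [] ∧ ' ' ∉ kv.1) (ws : List (List Char)) :
    kvs.foldl (fun s kv => repl1 kv.1 kv.2 s) (sjoin ws)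
      = sjoin (ws.map (fun w => kvs.foldl (fun s kv => repl1 kv.1 kv.2 s) w)) := by
  induction kvs generalizing ws with
  | nil => simp
  | cons kv rest ih =>
    obtain ⟨h1, h2⟩ := h kv (by simp)
    rw [List.foldl_cons, repl1_sjoin kv.1 kv.2 h1 h2,
      ih (fun p hp => h p (by simp [hp])) (ws.map (repl1 kv.1 kv.2)), List.map_map]
    rfl

-- B's scan over a non-uppercase region copies it
theorem pvPattern_good : goodKV pvPattern := by
  constructor
  · decide
  · decide

theorem pvSub_nil : pvSub [] = [] := by rw [pvSub]

theorem pvSub_cons_none (c : Char) (t : List Char)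
    (h : pvPattern.find? (fun kv => kv.1.isPrefixOf (c :: t)) = none) :
    pvSub (c :: t) = c :: pvSub t := by
  rw [pvSub, h]

theorem pvSub_cons_some (c : Char) (t : List Char) (kv : List Char × List Char)
    (h : pvPattern.find? (fun kv => kv.1.isPrefixOf (c :: t)) = some kv) :
    pvSub (c :: t) = kv.2 ++ pvSub (t.drop (kv.1.length - 1)) := by
  rw [pvSub, h]

theorem pvSub_region (pre x : List Char) (h : ∀ c ∈ pre, PySem.Chars.isupper c = false) :
    pvSub (pre ++ x) = pre ++ pvSub x := by
  induction pre with
  | nil => simp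
  | cons c pre' ih =>
    have hnone : pvPattern.find? (fun kv => kv.1.isPrefixOf (c :: (pre' ++ x))) = none := by
      rw [List.find?_eq_none]
      intro kv hkv
      obtain ⟨hk1, hk2, hk3⟩ := pvPattern_good.1 kv hkv
      simp [not_prefix_of_headI hk1 hk3 (h c (by simp))]
    rw [List.cons_append, pvSub_cons_none _ _ hnone, ih (fun y hy => h y (by simp [hy]))]
    simp

-- B's scan on joined good words equals wSpec per word
theorem pvSub_word_tail {kv : List Char × List Char} {c : Char} {m tail : List Char}
    (hk1 : kv.1 ≠ []) (htail : kv.1 ++ tail = c :: m)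
    (hw3 : ∀ x ∈ m, PySem.Chars.isupper x = false) :
    (∀ x ∈ tail, PySem.Chars.isupper x = false) ∧ m.drop (kv.1.length - 1) = tail := by
  cases hK : kv.1 with
  | nil => exact absurd hK hk1
  | cons a kt =>
    rw [hK, List.cons_append] at htail
    have hm : m = kt ++ tail := by
      injection htail with h1 h2
      exact h2.symm
    constructor
    · intro x hx
      exact hw3 x (hm ▸ List.mem_append_right kt hx)
    · rw [hm]
      simp [List.drop_left]

theorem pvSub_fix (pre : List Char) (h : ∀ c ∈ pre, PySem.Chars.isupper c = false) :
    pvSub pre = pre := by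
  have := pvSub_region pre [] h
  rw [pvSub_nil] at this
  simpa using this

theorem pvSub_sjoin (ws : List (List Char)) (hws : ∀ w ∈ ws, goodWord w) :
    pvSub (sjoin ws) = sjoin (ws.map (wSpec pvPattern)) := by
  induction ws with
  | nil => exact pvSub_nil
  | cons w ws ih =>
    obtain ⟨hw1, hw2, hw3⟩ := hws w (by simp)
    obtain ⟨c, m, rfl⟩ : ∃ c m, w = c :: m := by
      cases w with
      | nil => exact absurd rfl hw1
      | cons c m => exact ⟨c, m, rfl⟩
    simp only [List.tail_cons] at hw3
    cases ws with
    | nil =>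
      show pvSub (c :: m) = sjoin [wSpec pvPattern (c :: m)]
      cases hf : pvPattern.find? (fun kv => kv.1.isPrefixOf (c :: m)) with
      | none =>
        rw [pvSub_cons_none _ _ hf]
        rw [pvSub_fix m hw3, wSpec, hf]
        rfl
      | some kv =>
        obtain ⟨hk1, hk2, hk3⟩ := pvPattern_good.1 kv (List.mem_of_find?_eq_some hf)
        have hpre : kv.1 <+: c :: m :=
          List.isPrefixOf_iff_prefix.mp (by simpa using List.find?_some hf)
        obtain ⟨tail, htail⟩ := hpre
        obtain ⟨htail_up, hdrop⟩ := pvSub_word_tail hk1 htail hw3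
        rw [pvSub_cons_some _ _ _ hf, hdrop, pvSub_fix tail htail_up]
        have hwv : wSpec pvPattern (c :: m) = kv.2 ++ tail := by
          simp only [wSpec, hf]
          rw [← htail, List.drop_left]
        show kv.2 ++ tail = sjoin [wSpec pvPattern (c :: m)]
        rw [hwv]
        rfl
    | cons w₂ ws' =>
      rw [sjoin_cons₂]
      have hext : ∀ kv ∈ pvPattern,
          kv.1.isPrefixOf ((c :: m) ++ ' ' :: sjoin (w₂ :: ws'))
            = kv.1.isPrefixOf (c :: m) := by
        intro kv hkv
        exact prefix_space_ext kv.1 (c :: m) _ (pvPattern_good.1 kv hkv).2.1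
      have hfind : pvPattern.find? (fun kv => kv.1.isPrefixOf ((c :: m) ++ ' ' :: sjoin (w₂ :: ws')))
          = pvPattern.find? (fun kv => kv.1.isPrefixOf (c :: m)) :=
        find?_congr' _ _ _ hext
      have hih := ih (fun u hu => hws u (by simp [hu]))
      cases hf : pvPattern.find? (fun kv => kv.1.isPrefixOf (c :: m)) with
      | none =>
        have hf' : pvPattern.find?
            (fun kv => kv.1.isPrefixOf (c :: (m ++ ' ' :: sjoin (w₂ :: ws')))) = none := by
          rw [← List.cons_append, hfind, hf]
        rw [List.cons_append, pvSub_cons_none _ _ hf']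
        have hreg : pvSub ((m ++ [' ']) ++ sjoin (w₂ :: ws'))
            = (m ++ [' ']) ++ pvSub (sjoin (w₂ :: ws')) := by
          apply pvSub_region
          intro y hy
          rcases List.mem_append.mp hy with h | h
          · exact hw3 y h
          · simp at h
            subst h
            decide
        rw [List.append_assoc] at hreg
        simp only [List.cons_append, List.singleton_append, List.nil_append] at hreg
        rw [hreg, hih]
        have hwv : wSpec pvPattern (c :: m) = c :: m := by rw [wSpec, hf]
        simp only [List.map_cons]
        rw [sjoin_cons₂, hwv]
        simp
      | some kv =>
        obtain ⟨hk1, hk2, hk3⟩ := pvPattern_good.1 kv (List.mem_of_find?_eq_some hf)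
        have hpre : kv.1 <+: c :: m :=
          List.isPrefixOf_iff_prefix.mp (by simpa using List.find?_some hf)
        obtain ⟨tail, htail⟩ := hpre
        obtain ⟨htail_up, hdrop⟩ := pvSub_word_tail hk1 htail hw3
        have hf' : pvPattern.find?
            (fun kv => kv.1.isPrefixOf (c :: (m ++ ' ' :: sjoin (w₂ :: ws')))) = some kv := by
          rw [← List.cons_append, hfind, hf]
        rw [List.cons_append, pvSub_cons_some _ _ _ hf']
        have hk_le : kv.1.length - 1 ≤ m.length := by
          have := congrArg List.length htail
          simp at this
          omega
        rw [List.drop_append_of_le_length hk_le, hdrop]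
        have hreg : pvSub ((tail ++ [' ']) ++ sjoin (w₂ :: ws'))
            = (tail ++ [' ']) ++ pvSub (sjoin (w₂ :: ws')) := by
          apply pvSub_region
          intro y hy
          rcases List.mem_append.mp hy with h | h
          · exact htail_up y h
          · simp at h
            subst h
            decide
        rw [List.append_assoc] at hreg
        simp only [List.cons_append, List.singleton_append, List.nil_append] at hreg
        rw [hreg, hih]
        have hwv : wSpec pvPattern (c :: m) = kv.2 ++ tail := by
          simp only [wSpec, hf]
          rw [← htail, List.drop_left]
        simp only [List.map_cons]
        rw [sjoin_cons₂, hwv]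
        simp

-- string-level fold to list-level fold
theorem foldl_str_toList (l : List (String × String)) (s : String) :
    (l.foldl (fun cn p => PySem.Str.replace cn p.1 p.2) s).toList
      = (l.map (fun p => (p.1.toList, p.2.toList))).foldl
          (fun cs p => PySem.Chars.replace cs p.1 p.2) s.toList := by
  induction l generalizing s with
  | nil => rfl
  | cons p t ih =>
    rw [List.foldl_cons, ih, List.map_cons, List.foldl_cons, PySem.Str.toList_replace]

-- the capitalized words of any split are good words
theorem goodWord_cap (s : List Char) :
    ∀ w ∈ (PySem.Chars.split₀ s).map pvCapitalize, goodWord w := by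
  intro w hw
  obtain ⟨u, hu, rfl⟩ := List.mem_map.mp hw
  obtain ⟨hu1, hu2⟩ := split₀_good s u hu
  obtain ⟨c, t, rfl⟩ : ∃ c t, u = c :: t := by
    cases u with
    | nil => exact absurd rfl hu1
    | cons c t => exact ⟨c, t, rfl⟩
  have hne_space : ∀ x ∈ c :: t, x ≠ ' ' := by
    intro x hx heq
    have := hu2 x hx
    subst heq
    simp [PySem.Chars.isspace] at this
  refine ⟨by simp [pvCapitalize], ?_, ?_⟩
  · intro x hx
    rw [pvCapitalize] at hx
    rcases List.mem_cons.mp hx with h | h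
    · subst h
      exact upperChar_ne_space (hne_space c (by simp))
    · obtain ⟨y, hy, rfl⟩ := List.mem_map.mp h
      exact lowerChar_ne_space (hne_space y (by simp [hy]))
  · intro x hx
    rw [pvCapitalize] at hx
    simp only [List.tail_cons] at hx
    obtain ⟨y, hy, rfl⟩ := List.mem_map.mp hx
    exact isupper_lowerChar y

theorem eq_ofList_of_toList_eq {a : String} {l : List Char} (h : a.toList = l) :
    a = String.ofList l := by
  rw [← h, String.ofList_toList]

theorem foldl_chars_repl (kvs : List (List Char × List Char))
    (h : ∀ kv ∈ kvs, kv.1 ≠ []) (s : List Char) :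
    kvs.foldl (fun cs kv => PySem.Chars.replace cs kv.1 kv.2) s
      = kvs.foldl (fun cs kv => repl1 kv.1 kv.2 cs) s := by
  induction kvs generalizing s with
  | nil => rfl
  | cons kv rest ih =>
    rw [List.foldl_cons, List.foldl_cons, replace_eq_repl1 _ _ _ (h kv (by simp)),
      ih (fun p hp => h p (by simp [hp]))]

theorem phase1_toList (s : String) :
    (PySem.Str.replace (PySem.Str.replace s "_" " ") "-" " ").toList
      = s.toList.map pvTranslate := by
  rw [PySem.Str.toList_replace, PySem.Str.toList_replace]
  simp only [show ("_" : String).toList = ['_'] from rfl,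
    show ("-" : String).toList = ['-'] from rfl,
    show (" " : String).toList = [' '] from rfl]
  rw [replace_eq_repl1 _ _ _ (by simp), repl1_single,
    replace_eq_repl1 _ _ _ (by simp), repl1_single, List.map_map]
  apply List.map_congr_left
  intro c _
  by_cases h1 : c = '_'
  · subst h1; simp [pvTranslate, Function.comp]
  · by_cases h2 : c = '-' <;> simp [pvTranslate, Function.comp, h1, h2]

-- the joined capitalized words, on the list side
theorem join_toList (t : String) :
    (PySem.Str.join " "
        ((PySem.Str.split₀ t).map (fun word => String.ofList (pvCapitalize word.toList)))).toList
      = sjoin ((PySem.Chars.split₀ t.toList).map pvCapitalize) := by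
  rw [PySem.Str.toList_join, List.map_map]
  have hcomp : (String.toList ∘ fun word : String => String.ofList (pvCapitalize word.toList))
      = fun word : String => pvCapitalize word.toList := by
    funext w
    simp [String.toList_ofList]
  rw [hcomp]
  have hsplit : (PySem.Str.split₀ t).map (fun word : String => pvCapitalize word.toList)
      = ((PySem.Str.split₀ t).map String.toList).map pvCapitalize := by
    rw [List.map_map]; rfl
  rw [hsplit, PySem.Str.split₀_map_toList,
    show (" " : String).toList = [' '] from rfl, join_eq_sjoin]

-- ===== VERDICT (by name: the statement is the Claim_ definition above) =====
theorem get_clean_page_name_spec : Claim_equal_get_clean_page_name := by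
  unfold Claim_equal_get_clean_page_name
  intro s _hD
  unfold Spec_get_clean_page_name get_clean_page_name get_clean_page_name_alt
  dsimp only
  apply eq_ofList_of_toList_eq
  rw [foldl_str_toList,
    show pvReplacements.items.map (fun p => (p.1.toList, p.2.toList)) = pvPattern from rfl,
    foldl_chars_repl pvPattern (fun kv hkv => (pvPattern_good.1 kv hkv).1),
    join_toList, phase1_toList, join_toList, String.toList_ofList]
  rw [foldl_sjoin pvPattern
    (fun kv hkv => ⟨(pvPattern_good.1 kv hkv).1, (pvPattern_good.1 kv hkv).2.1⟩),
    pvSub_sjoin _ (goodWord_cap (s.toList.map pvTranslate))]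
  congr 1
  apply List.map_congr_left
  intro w hw
  exact foldl_word pvPattern pvPattern_good w (goodWord_cap (s.toList.map pvTranslate) w hw)
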